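-- pv_equiv track=rewrite | github.com/vippawar1104/kasparro-ai-agentic-content-generation-system-vipul-pawar | agents/comparison_agent.py | _categorize_benefits
-- ===== SOURCE A (Python) =====
-- from typing import Dict, Any
--
-- def _categorize_benefits(benefits: list) -> Dict[str, list]:
--     """Simple benefit categorization."""
--     return {
--         'treatment': [b for b in benefits if any(w in b.lower() for w in ['reduce', 'treat', 'fade'])],
--         'prevention': [b for b in benefits if any(w in b.lower() for w in ['prevent', 'protect'])],
--         'enhancement': [b for b in benefits if any(w in b.lower() for w in ['enhance', 'improve', 'boost'])],
--         'general': [b for b in benefits if b not in sum([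
--             [b for b in benefits if any(w in b.lower() for w in ['reduce', 'treat', 'fade', 'prevent', 'protect', 'enhance', 'improve', 'boost'])]
--         ], [])]
--     }
-- ===== SOURCE B (Python) =====
-- def _categorize_benefits(benefits: list):
--     """Single pass: lowercase each benefit once, append it to every matching
--     category, and to 'general' when no keyword matches."""
--     cats = {'treatment': [], 'prevention': [], 'enhancement': [], 'general': []}
--     groups = [('treatment', ('reduce', 'treat', 'fade')),
--               ('prevention', ('prevent', 'protect')),
--               ('enhancement', ('enhance', 'improve', 'boost'))]
--     for b in benefits:
--         bl = b.lower()
--         matched = False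
--         for name, words in groups:
--             if any(w in bl for w in words):
--                 cats[name].append(b)
--                 matched = True
--         if not matched:
--             cats['general'].append(b)
--     return cats
-- ===== Notes on version B (the rewrite author's own statement) =====
-- stated objective: faster
-- what changed: Replaces four separate comprehensions (the last rebuilding the matched list and doing a linear membership test per benefit) with one pass that lowercases each benefit once and appends it to each matching category or to general.
import Mathlib
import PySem

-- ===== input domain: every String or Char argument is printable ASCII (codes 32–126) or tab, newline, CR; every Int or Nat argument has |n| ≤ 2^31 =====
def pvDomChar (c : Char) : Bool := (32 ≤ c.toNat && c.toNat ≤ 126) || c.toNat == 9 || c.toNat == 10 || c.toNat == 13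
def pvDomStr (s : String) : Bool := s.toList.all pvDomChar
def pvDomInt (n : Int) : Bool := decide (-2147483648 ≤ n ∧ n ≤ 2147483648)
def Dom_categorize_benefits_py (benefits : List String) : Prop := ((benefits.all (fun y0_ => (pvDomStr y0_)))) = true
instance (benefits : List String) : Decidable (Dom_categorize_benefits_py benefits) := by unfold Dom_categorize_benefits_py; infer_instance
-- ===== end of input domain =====

-- B replaces A's four comprehensions (the last with a quadratic membership test) by one pass
-- that lowercases each benefit once and appends it to each matching category or to general.

-- ===== PORT A =====
-- A: four list comprehensions over `benefits`; 'general' filters by membership in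
-- sum([<matched list>], []) (= [] ++ matched list, folded by +).
def categorize_benefits_py (benefits : List String) : List (String × List String) :=
  [("treatment", benefits.filter (fun b =>
      (["reduce", "treat", "fade"] : List String).any (fun w => PySem.Str.isIn w (PySem.Str.lower b)))),
   ("prevention", benefits.filter (fun b =>
      (["prevent", "protect"] : List String).any (fun w => PySem.Str.isIn w (PySem.Str.lower b)))),
   ("enhancement", benefits.filter (fun b =>
      (["enhance", "improve", "boost"] : List String).any (fun w => PySem.Str.isIn w (PySem.Str.lower b)))),
   ("general", benefits.filter (fun b =>
      !(List.foldl (· ++ ·) ([] : List String)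
          [benefits.filter (fun b' =>
            (["reduce", "treat", "fade", "prevent", "protect", "enhance", "improve", "boost"] : List String).any
              (fun w => PySem.Str.isIn w (PySem.Str.lower b')))]).contains b))]

-- ===== PORT B =====
-- B's loop, transcribed as structural recursion building the four lists back-to-front;
-- each benefit is lowercased once (`bl`) and tested against each keyword group once.
def categorize_benefits_py_alt_go : List String →
    List String × List String × List String × List String
  | [] => ([], [], [], [])
  | b :: rest =>
    let (t, p, e, g) := categorize_benefits_py_alt_go rest
    let bl := PySem.Str.lower b
    let mt := (["reduce", "treat", "fade"] : List String).any (fun w => PySem.Str.isIn w bl)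
    let mp := (["prevent", "protect"] : List String).any (fun w => PySem.Str.isIn w bl)
    let me := (["enhance", "improve", "boost"] : List String).any (fun w => PySem.Str.isIn w bl)
    (if mt then b :: t else t,
     if mp then b :: p else p,
     if me then b :: e else e,
     if !mt && !mp && !me then b :: g else g)

def categorize_benefits_py_alt (benefits : List String) : List (String × List String) :=
  let (t, p, e, g) := categorize_benefits_py_alt_go benefits
  [("treatment", t), ("prevention", p), ("enhancement", e), ("general", g)]

-- ===== PRECONDITION & SPEC =====
def Spec_categorize_benefits_py (benefits : List String) (out : List (String × List String)) : Prop := out = categorize_benefits_py_alt benefits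
instance (benefits : List String) (out : List (String × List String)) : Decidable (Spec_categorize_benefits_py benefits out) := by unfold Spec_categorize_benefits_py; infer_instance

-- ===== CLAIM (what is proved, stated in full; the proofs are below) =====
def Claim_equal_categorize_benefits_py : Prop := ∀ (benefits : List String), Dom_categorize_benefits_py benefits → Spec_categorize_benefits_py benefits (categorize_benefits_py benefits)

-- ===== LEMMAS AND PROOFS =====

-- B's fold computes the four filters of A's first three comprehensions plus the
-- "matches no keyword" filter.
theorem categorize_go_eq (l : List String) :
    categorize_benefits_py_alt_go l =
      (l.filter (fun b =>
        (["reduce", "treat", "fade"] : List String).any (fun w => PySem.Str.isIn w (PySem.Str.lower b))),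
       l.filter (fun b =>
        (["prevent", "protect"] : List String).any (fun w => PySem.Str.isIn w (PySem.Str.lower b))),
       l.filter (fun b =>
        (["enhance", "improve", "boost"] : List String).any (fun w => PySem.Str.isIn w (PySem.Str.lower b))),
       l.filter (fun b =>
        !(["reduce", "treat", "fade", "prevent", "protect", "enhance", "improve", "boost"] : List String).any
          (fun w => PySem.Str.isIn w (PySem.Str.lower b)))) := by
  induction l with
  | nil => rfl
  | cons b rest ih =>
    simp only [categorize_benefits_py_alt_go, ih, List.filter_cons, List.any_cons, List.any_nil]
    cases h1 : PySem.Str.isIn "reduce" (PySem.Str.lower b) <;>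
    cases h2 : PySem.Str.isIn "treat" (PySem.Str.lower b) <;>
    cases h3 : PySem.Str.isIn "fade" (PySem.Str.lower b) <;>
    cases h4 : PySem.Str.isIn "prevent" (PySem.Str.lower b) <;>
    cases h5 : PySem.Str.isIn "protect" (PySem.Str.lower b) <;>
    cases h6 : PySem.Str.isIn "enhance" (PySem.Str.lower b) <;>
    cases h7 : PySem.Str.isIn "improve" (PySem.Str.lower b) <;>
    cases h8 : PySem.Str.isIn "boost" (PySem.Str.lower b) <;> simp

-- A's 'general' membership test is equivalent to "matches no keyword" for elements of the list.
theorem general_filter_eq (benefits : List String) :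
    benefits.filter (fun b =>
      !(List.foldl (· ++ ·) ([] : List String)
          [benefits.filter (fun b' =>
            (["reduce", "treat", "fade", "prevent", "protect", "enhance", "improve", "boost"] : List String).any
              (fun w => PySem.Str.isIn w (PySem.Str.lower b')))]).contains b) =
    benefits.filter (fun b =>
      !(["reduce", "treat", "fade", "prevent", "protect", "enhance", "improve", "boost"] : List String).any
          (fun w => PySem.Str.isIn w (PySem.Str.lower b))) := by
  apply List.filter_congr
  intro b hb
  simp only [List.foldl, List.nil_append]
  congr 1
  cases h : (["reduce", "treat", "fade", "prevent", "protect", "enhance", "improve", "boost"] : List String).any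
      (fun w => PySem.Str.isIn w (PySem.Str.lower b)) with
  | false => simp [List.mem_filter]; intro _; simpa using h
  | true => simp [List.mem_filter, hb]; simpa using h

-- ===== VERDICT =====
theorem categorize_benefits_py_spec : Claim_equal_categorize_benefits_py := by
  intro benefits _
  unfold Spec_categorize_benefits_py categorize_benefits_py categorize_benefits_py_alt
  rw [categorize_go_eq, general_filter_eq]
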